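-- pv_equiv track=rewrite | github.com/R1C3-arno/VaiLozLun_dauCAtMoi | main.py | compute_ts
-- ===== SOURCE A (Python) =====
-- def compute_ts(a, b):
--     m = len(a)
--     ts_list = []
--
--     for j in range(1, m + 1):   # j = 1..m (đúng như paper)
--         sum_a = sum(a[j:])     # i = j+1 .. m  (đúng mapping)
--         sum_b = sum(b[:j])     # i = 1 .. j
--         ts_j = sum_a - sum_b
--         ts_list.append(ts_j)
--
--     return ts_list
-- ===== SOURCE B (Python) =====
-- def compute_ts(a, b):
--     suffix = sum(a)   # running suffix-sum of a
--     prefix = 0        # running prefix-sum of b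
--     out = []
--     for j, x in enumerate(a):
--         suffix -= x
--         if j < len(b):
--             prefix += b[j]
--         out.append(suffix - prefix)
--     return out
-- ===== Notes on version B (the rewrite author's own statement) =====
-- stated objective: faster
-- what changed: Replaced the per-index re-summation of the slices a[j:] and b[:j] by a single pass that maintains a running suffix sum of a and prefix sum of b, emitting each ts_j in O(1).
import Mathlib
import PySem

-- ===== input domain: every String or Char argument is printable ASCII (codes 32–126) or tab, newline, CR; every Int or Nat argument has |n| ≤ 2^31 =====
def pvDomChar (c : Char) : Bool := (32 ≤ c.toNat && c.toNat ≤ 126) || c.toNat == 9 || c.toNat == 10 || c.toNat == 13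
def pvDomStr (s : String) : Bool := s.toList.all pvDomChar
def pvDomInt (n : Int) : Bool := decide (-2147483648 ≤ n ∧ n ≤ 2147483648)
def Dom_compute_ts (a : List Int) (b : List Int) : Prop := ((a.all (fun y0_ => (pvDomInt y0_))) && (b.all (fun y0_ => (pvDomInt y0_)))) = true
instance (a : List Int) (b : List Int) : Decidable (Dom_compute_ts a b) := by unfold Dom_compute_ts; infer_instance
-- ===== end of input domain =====

-- B replaces A's quadratic re-summation of a[j:] and b[:j] by a single pass with
-- running suffix/prefix sums (objective: faster, O(m^2) -> O(m)).

-- ===== PORT A =====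
def compute_ts (a : List Int) (b : List Int) : List Int :=
  let m : Int := a.length
  (PySem.List.pyRange 1 (m + 1) 1).foldl
    (fun ts_list j =>
      let sum_a := (PySem.List.slice a (some j) none).sum
      let sum_b := (PySem.List.slice b none (some j)).sum
      ts_list ++ [sum_a - sum_b]) []

-- ===== PORT B =====
def computeTsLoop : List Int → List Int → Int → Int → List Int
  | [], _, _, _ => []
  | x :: xs, bs, sfx, pfx =>
    let sfx' := sfx - x
    let pfx' := pfx + bs.headD 0   -- 'if j < len(b): prefix += b[j]'
    (sfx' - pfx') :: computeTsLoop xs bs.tail sfx' pfx'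

def compute_ts_alt (a : List Int) (b : List Int) : List Int :=
  computeTsLoop a b a.sum 0

-- ===== PRECONDITION & SPEC =====
def Spec_compute_ts (a : List Int) (b : List Int) (out : List Int) : Prop := out = compute_ts_alt a b
instance (a : List Int) (b : List Int) (out : List Int) : Decidable (Spec_compute_ts a b out) := by unfold Spec_compute_ts; infer_instance

-- ===== CLAIM (what is proved, stated in full; the proofs are below) =====
def Claim_equal_compute_ts : Prop := ∀ (a : List Int) (b : List Int), Dom_compute_ts a b → Spec_compute_ts a b (compute_ts a b)

-- ===== LEMMAS AND PROOFS =====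

-- A as a closed form over indices.
lemma compute_ts_closed (a b : List Int) :
    compute_ts a b =
      (List.range a.length).map
        (fun k => (a.drop (k + 1)).sum - (b.take (k + 1)).sum) := by
  unfold compute_ts
  rw [PySem.List.foldl_append_singleton_eq_map, PySem.List.pyRange_one]
  have h1 : ((((a.length : Int)) + 1 - 1).toNat) = a.length := by omega
  rw [h1, List.map_map]
  apply List.map_congr_left
  intro k _
  have hfrom : ((1 : Int) + k) = ((k + 1 : Nat) : Int) := by push_cast; ring
  simp only [Function.comp, hfrom, PySem.List.slice_from_natCast,
    PySem.List.slice_to_natCast]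

-- B's loop as the same closed form shifted by the accumulators.
lemma computeTsLoop_closed (xs : List Int) :
    ∀ (bs : List Int) (s p : Int),
      computeTsLoop xs bs s p =
        (List.range xs.length).map
          (fun k => (s - (xs.take (k + 1)).sum) - (p + (bs.take (k + 1)).sum)) := by
  induction xs with
  | nil => intro bs s p; simp [computeTsLoop]
  | cons x xs ih =>
    intro bs s p
    show (s - x - (p + bs.headD 0)) :: computeTsLoop xs bs.tail (s - x) (p + bs.headD 0) = _
    rw [ih, List.length_cons, List.range_succ_eq_map, List.map_cons, List.map_map]
    congr 1
    · cases bs <;> simp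
    · apply List.map_congr_left
      intro k _
      have hb : (bs.take (k + 1 + 1)).sum = bs.headD 0 + (bs.tail.take (k + 1)).sum := by
        cases bs <;> simp
      simp only [Function.comp, Nat.succ_eq_add_one, List.take_succ_cons, List.sum_cons, hb]
      ring

theorem compute_ts_eq_alt (a b : List Int) : compute_ts a b = compute_ts_alt a b := by
  rw [compute_ts_closed, compute_ts_alt, computeTsLoop_closed]
  apply List.map_congr_left
  intro k _
  have h := List.sum_take_add_sum_drop a (k + 1)
  omega

-- ===== VERDICT (by name: the statement is the Claim_ definition above) =====
theorem compute_ts_spec : Claim_equal_compute_ts := by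
  intro a b _
  exact compute_ts_eq_alt a b
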